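-- pv_equiv track=rewrite | github.com/EnzoMartinez25/Proyecto-integrador | estadisticas.py | cantidad_por_continente
-- ===== SOURCE A (Python) =====
-- def cantidad_por_continente(paises):
--     continentes = {}
--
--     for p in paises:
--         cont = p["continente"]
--         if cont in continentes:
--             continentes[cont] += 1
--         else:
--             continentes[cont] = 1
--     return continentes
-- ===== SOURCE B (Python) =====
-- def cantidad_por_continente(paises):
--     # distinct continents in first-occurrence order, then one counting scan per continent
--     distinct = []
--     for p in paises:
--         c = p["continente"]
--         if c not in distinct:
--             distinct.append(c)
--     return {c: sum(1 for p in paises if p["continente"] == c) for c in distinct}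
-- ===== Notes on version B (the rewrite author's own statement) =====
-- stated objective: alternative
-- what changed: Replaces the single accumulating counter pass with an index of distinct continents followed by one full counting scan per distinct continent.
import Mathlib
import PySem

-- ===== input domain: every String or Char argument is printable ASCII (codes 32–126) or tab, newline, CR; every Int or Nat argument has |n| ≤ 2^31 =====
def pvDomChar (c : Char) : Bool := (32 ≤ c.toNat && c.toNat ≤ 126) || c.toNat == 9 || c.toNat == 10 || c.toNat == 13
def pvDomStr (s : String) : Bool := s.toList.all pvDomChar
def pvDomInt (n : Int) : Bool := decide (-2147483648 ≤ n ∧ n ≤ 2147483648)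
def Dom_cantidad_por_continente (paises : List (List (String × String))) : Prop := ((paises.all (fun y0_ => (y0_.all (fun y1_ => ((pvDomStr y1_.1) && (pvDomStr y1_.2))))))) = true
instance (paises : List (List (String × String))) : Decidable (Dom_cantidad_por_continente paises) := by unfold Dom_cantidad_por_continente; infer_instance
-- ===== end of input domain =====

-- B builds the list of distinct continents first and then makes one counting scan per
-- distinct continent, instead of A's single accumulating counter dict (objective: alternative).

-- ===== PORT A =====
-- A: one pass, a counter dict keyed by continent (insert 1 on first sight, +1 after).
def cantidad_por_continente (paises : List (List (String × String))) : List (String × Int) :=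
  (paises.foldl (fun d p =>
      let cont := ((PySem.Dict.mk p).get? "continente").getD ""   -- p["continente"]; Pre_ rules out the missing-key (KeyError) case
      if d.contains cont then d.insert cont (d.getD cont 0 + 1)
      else d.insert cont 1)
    PySem.Dict.empty).items

-- ===== PORT B =====
def cantidad_por_continente_alt (paises : List (List (String × String))) : List (String × Int) :=
  let distinct := paises.foldl (fun ds p =>
      let c := ((PySem.Dict.mk p).get? "continente").getD ""      -- p["continente"]; Pre_ rules out the missing-key case
      if c ∈ ds then ds else ds ++ [c]) []
  distinct.map (fun c =>
    (c, paises.foldl (fun n p =>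
          if ((PySem.Dict.mk p).get? "continente").getD "" == c then n + 1 else n) 0))

-- ===== PRECONDITION & SPEC =====
-- Exactly the inputs where Python A returns: every country dict carries the key "continente"
-- (otherwise p["continente"] raises KeyError, in both A and B).
def Pre_cantidad_por_continente (paises : List (List (String × String))) : Prop :=
  ∀ p ∈ paises, "continente" ∈ p.map (·.1)
instance (paises : List (List (String × String))) : Decidable (Pre_cantidad_por_continente paises) := by unfold Pre_cantidad_por_continente; infer_instance
def pvWitness_cantidad_por_continente : (List (List (String × String))) :=
  [[("nombre", "Peru"), ("continente", "America")], [("continente", "Asia")]]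

def Spec_cantidad_por_continente (paises : List (List (String × String))) (out : List (String × Int)) : Prop := out = cantidad_por_continente_alt paises
instance (paises : List (List (String × String))) (out : List (String × Int)) : Decidable (Spec_cantidad_por_continente paises out) := by unfold Spec_cantidad_por_continente; infer_instance

-- ===== CLAIM (what is proved, stated in full; the proofs are below) =====
def Claim_equal_cantidad_por_continente : Prop := ∀ (paises : List (List (String × String))), Dom_cantidad_por_continente paises → Pre_cantidad_por_continente paises → Spec_cantidad_por_continente paises (cantidad_por_continente paises)

-- ===== LEMMAS AND PROOFS =====

-- the continent of one country record
def pvKey (p : List (String × String)) : String :=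
  ((PySem.Dict.mk p).get? "continente").getD ""

-- A's fold is the standard counter fold over the list of keys
lemma pvA_fold_eq (paises : List (List (String × String))) (d : PySem.Dict String Int) :
    paises.foldl (fun d p =>
        let cont := ((PySem.Dict.mk p).get? "continente").getD ""
        if d.contains cont then d.insert cont (d.getD cont 0 + 1)
        else d.insert cont 1) d
      = (paises.map pvKey).foldl (fun d x => d.insert x (d.getD x 0 + 1)) d := by
  induction paises generalizing d with
  | nil => rfl
  | cons p ps ih =>
      simp only [List.foldl_cons, List.map_cons]
      rw [ih]
      have hstep : (let cont := ((PySem.Dict.mk p).get? "continente").getD ""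
          if d.contains cont then d.insert cont (d.getD cont 0 + 1) else d.insert cont 1)
          = d.insert (pvKey p) (d.getD (pvKey p) 0 + 1) := by
        show (if d.contains (pvKey p) then d.insert (pvKey p) (d.getD (pvKey p) 0 + 1)
              else d.insert (pvKey p) 1) = _
        by_cases h : d.contains (pvKey p)
        · rw [if_pos h]
        · rw [if_neg h]
          have h0 : d.getD (pvKey p) 0 = 0 := by
            simp [PySem.Dict.getD_of_not_contains, eq_false_of_ne_true h]
          rw [h0]
          norm_num
      rw [hstep]

-- B's distinct-building fold is Set.ofList of the keys
lemma pvB_distinct_eq (paises : List (List (String × String))) (s : PySem.Set String) :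
    paises.foldl (fun ds p =>
        let c := ((PySem.Dict.mk p).get? "continente").getD ""
        if c ∈ ds then ds else ds ++ [c]) s
      = PySem.Set.update s (paises.map pvKey) := by
  induction paises generalizing s with
  | nil => simp [PySem.Set.update_nil]
  | cons p ps ih =>
      simp only [List.foldl_cons, List.map_cons, PySem.Set.update_cons]
      rw [ih]
      congr 1
      rw [PySem.Set.add_eq_ite]
      rfl

-- B's inner counting scan counts occurrences of c among the keys
lemma pvB_count_eq (paises : List (List (String × String))) (c : String) (n : Int) :
    paises.foldl (fun n p =>
        if ((PySem.Dict.mk p).get? "continente").getD "" == c then n + 1 else n) n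
      = n + ((paises.map pvKey).count c : Int) := by
  induction paises generalizing n with
  | nil => simp
  | cons p ps ih =>
      simp only [List.foldl_cons, List.map_cons]
      by_cases h : pvKey p = c
      · simp only [pvKey] at h
        rw [if_pos (by simp [h]), ih]
        simp [pvKey, h]
        ring
      · simp only [pvKey] at h
        rw [if_neg (by simpa using h), ih]
        simp [pvKey, h]

-- ===== VERDICT (by name: the statement is the Claim_ definition above) =====
theorem cantidad_por_continente_spec : Claim_equal_cantidad_por_continente := by
  intro paises _ _
  unfold Spec_cantidad_por_continente cantidad_por_continente cantidad_por_continente_alt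
  rw [pvA_fold_eq, PySem.Dict.foldl_insert_getD_add_one_eq_counter, PySem.Dict.items_counter,
      pvB_distinct_eq, PySem.Set.update_nil_left]
  apply List.map_congr_left
  intro c _
  rw [pvB_count_eq]
  simp
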